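-- pv_equiv track=rewrite | github.com/metauto-ai/NeuralComputer | engine/cli/vhs/runtime/normalize_type_quotes.py | split_type_line
-- ===== SOURCE A (Python) =====
-- PREFIX = 'Type "'
--
-- def split_type_line(line: str) -> tuple[str, str, str] | None:
--     if not line.startswith(PREFIX):
--         return None
--     i = len(line) - 1
--     closing_index = -1
--     while i >= len(PREFIX):
--         if line[i] == '"':
--             backslash_count = 0
--             j = i - 1
--             while j >= len(PREFIX) and line[j] == '\\':
--                 backslash_count += 1
--                 j -= 1
--             if backslash_count % 2 == 0:
--                 closing_index = i
--                 break
--         i -= 1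
--     if closing_index == -1:
--         return None
--     content = line[len(PREFIX):closing_index]
--     remainder = line[closing_index + 1 :]
--     return PREFIX, content, remainder
-- ===== SOURCE B (Python) =====
-- PREFIX = 'Type "'
--
-- def split_type_line(line: str) -> tuple[str, str, str] | None:
--     if not line.startswith(PREFIX):
--         return None
--     closing_index = -1
--     escaped = False
--     for i in range(len(PREFIX), len(line)):
--         c = line[i]
--         if escaped:
--             escaped = False
--         elif c == '\\':
--             escaped = True
--         elif c == '"':
--             closing_index = i
--     if closing_index == -1:
--         return None
--     return PREFIX, line[len(PREFIX):closing_index], line[closing_index + 1:]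
-- ===== Notes on version B (the rewrite author's own statement) =====
-- stated objective: simpler
-- what changed: Replaced A's backward scan with a nested backslash-counting inner loop by a single forward pass that keeps an `escaped` boolean and remembers the last unescaped quote.
import Mathlib
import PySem

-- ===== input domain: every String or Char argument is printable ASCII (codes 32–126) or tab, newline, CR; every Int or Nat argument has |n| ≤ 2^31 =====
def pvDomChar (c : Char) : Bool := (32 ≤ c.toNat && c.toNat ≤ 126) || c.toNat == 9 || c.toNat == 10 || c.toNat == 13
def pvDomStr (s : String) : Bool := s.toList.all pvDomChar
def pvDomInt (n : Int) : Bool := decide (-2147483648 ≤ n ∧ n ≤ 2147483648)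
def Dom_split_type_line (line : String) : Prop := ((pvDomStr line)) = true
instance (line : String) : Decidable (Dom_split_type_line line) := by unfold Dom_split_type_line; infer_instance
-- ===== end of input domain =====

-- B replaces A's backward scan with an inner backslash-counting loop by one forward pass
-- keeping an `escaped` flag and remembering the last unescaped quote (objective: simpler, one pass).

-- ===== PORT A =====
-- PREFIX = 'Type "' (length 6)
def pvPrefix : List Char := "Type \"".toList

-- inner while loop: count consecutive backslashes at j, j-1, … while j ≥ len(PREFIX)
-- (indices passed to aCount are always < cs.length in A's use; getD is exact there)
def aCount (cs : List Char) (j : Nat) : Nat :=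
  if h : 6 ≤ j ∧ cs.getD j ' ' = '\\' then aCount cs (j - 1) + 1 else 0
termination_by j
decreasing_by omega

-- outer while loop: i walks down from len-1; break (some i) when a quote with an
-- even backslash run is found, none when i drops below len(PREFIX)
def aFind (cs : List Char) (i : Nat) : Option Nat :=
  if h : 6 ≤ i then
    if cs.getD i ' ' = '"' then
      if aCount cs (i - 1) % 2 = 0 then some i
      else aFind cs (i - 1)
    else aFind cs (i - 1)
  else none
termination_by i
decreasing_by all_goals omega

def split_type_line (line : String) : Option (String × String × String) :=
  let cs := line.toList
  if PySem.Chars.startswith cs pvPrefix then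
    match aFind cs (cs.length - 1) with
    | some ci =>
        -- line[6:ci] and line[ci+1:] with 6 ≤ ci < len: clamped drop/take is Python-exact here
        some ("Type \"", String.ofList ((cs.drop 6).take (ci - 6)), String.ofList (cs.drop (ci + 1)))
    | none => none
  else none

-- ===== PORT B =====
-- single forward pass, for i in range(6, len(line)): escaped flag, last unescaped quote wins
def bScan (cs : List Char) (i : Nat) (escaped : Bool) (closing : Option Nat) : Option Nat :=
  if h : i < cs.length then
    if escaped then bScan cs (i + 1) false closing
    else if cs.getD i ' ' = '\\' then bScan cs (i + 1) true closing
    else if cs.getD i ' ' = '"' then bScan cs (i + 1) false (some i)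
    else bScan cs (i + 1) escaped closing
  else closing
termination_by cs.length - i
decreasing_by all_goals omega

def split_type_line_alt (line : String) : Option (String × String × String) :=
  let cs := line.toList
  if PySem.Chars.startswith cs pvPrefix then
    match bScan cs 6 false none with
    | some ci =>
        some ("Type \"", String.ofList ((cs.drop 6).take (ci - 6)), String.ofList (cs.drop (ci + 1)))
    | none => none
  else none

-- ===== PRECONDITION & SPEC =====
def Spec_split_type_line (line : String) (out : Option (String × String × String)) : Prop := out = split_type_line_alt line
instance (line : String) (out : Option (String × String × String)) : Decidable (Spec_split_type_line line out) := by unfold Spec_split_type_line; infer_instance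

-- ===== CLAIM (what is proved, stated in full; the proofs are below) =====
def Claim_equal_split_type_line : Prop := ∀ (line : String), Dom_split_type_line line → Spec_split_type_line line (split_type_line line)

-- ===== LEMMAS AND PROOFS =====

-- "index k closes the quoted content": k ≥ 6, a quote, preceded by an even backslash run
def pvGood (cs : List Char) (k : Nat) : Bool :=
  6 ≤ k && cs.getD k ' ' == '"' && aCount cs (k - 1) % 2 == 0

-- last good index in [i, cs.length), as a reference point for both scans
def pvLG (cs : List Char) (i : Nat) : Option Nat :=
  if _h : i < cs.length then
    match pvLG cs (i + 1) with
    | some k => some k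
    | none => if pvGood cs i then some i else none
  else none
termination_by cs.length - i
decreasing_by omega

lemma aCount_even_of_odd (cs : List Char) (i : Nat) (h : aCount cs (i - 1) % 2 = 1) :
    aCount cs i % 2 = 0 := by
  rw [aCount]
  split
  · omega
  · rfl

lemma bScan_eq_LG (cs : List Char) : ∀ n i closing, cs.length ≤ i + n → 6 ≤ i →
    bScan cs i (decide (aCount cs (i - 1) % 2 = 1)) closing =
      match pvLG cs i with | some k => some k | none => closing := by
  intro n
  induction n with
  | zero =>
    intro i closing hn h6
    rw [bScan, pvLG]
    rw [dif_neg (by omega), dif_neg (by omega)]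
  | succ n ih =>
    intro i closing hn h6
    by_cases hi : i < cs.length
    · rw [bScan, pvLG, dif_pos hi, dif_pos hi]
      have hsub : i + 1 - 1 = i := by omega
      by_cases he : aCount cs (i - 1) % 2 = 1
      · -- escaped: current char cannot be an unescaped quote
        rw [if_pos (by simp [he])]
        have hg : pvGood cs i = false := by
          unfold pvGood
          have hne : aCount cs (i - 1) % 2 ≠ 0 := by omega
          simp [hne]
        have hnext : aCount cs i % 2 = 1 ↔ False := by
          simp [aCount_even_of_odd cs i he]
        have := ih (i + 1) closing (by omega) (by omega)
        rw [hsub] at this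
        simp only [hnext, decide_false] at this ⊢
        rw [this]
        cases hLG : pvLG cs (i + 1) <;> simp [hg]
      · rw [if_neg (by simp [he])]
        by_cases hbs : cs.getD i ' ' = '\\'
        · rw [if_pos hbs]
          have hcnt : aCount cs i = aCount cs (i - 1) + 1 := by
            rw [aCount]; rw [dif_pos ⟨h6, hbs⟩]
          have hg : pvGood cs i = false := by unfold pvGood; rw [hbs]; simp
          have hnext : (decide (aCount cs i % 2 = 1)) = true := by
            simp [hcnt]; omega
          have := ih (i + 1) closing (by omega) (by omega)
          rw [hsub, hnext] at this
          rw [this]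
          cases hLG : pvLG cs (i + 1) <;> simp [hg]
        · rw [if_neg hbs]
          have hcnt : aCount cs i = 0 := by
            rw [aCount]; rw [dif_neg (by tauto)]
          have hnext : (decide (aCount cs i % 2 = 1)) = false := by simp [hcnt]
          by_cases hq : cs.getD i ' ' = '"'
          · rw [if_pos hq]
            have hg : pvGood cs i = true := by
              unfold pvGood; rw [hq]; simp [h6]; omega
            have := ih (i + 1) (some i) (by omega) (by omega)
            rw [hsub, hnext] at this
            rw [this]
            cases hLG : pvLG cs (i + 1) <;> simp [hg]
          · rw [if_neg hq]
            have hg : pvGood cs i = false := by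
              unfold pvGood
              have hq' : (cs.getD i ' ' == '"') = false := by
                simpa using hq
              rw [hq']; simp
            have := ih (i + 1) closing (by omega) (by omega)
            rw [hsub] at this
            rw [show (decide (aCount cs (i-1) % 2 = 1)) = decide (aCount cs i % 2 = 1) by
              simp [hnext, he]] 
            rw [this]
            cases hLG : pvLG cs (i + 1) <;> simp [hg]
    · rw [bScan, pvLG, dif_neg hi, dif_neg hi]

lemma aFind_eq_LG (cs : List Char) : ∀ n i, cs.length ≤ i + n → 6 ≤ i → i ≤ cs.length →
    aFind cs (cs.length - 1) =
      match pvLG cs i with | some k => some k | none => aFind cs (i - 1) := by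
  intro n
  induction n with
  | zero =>
    intro i hn h6 hlen
    have : i = cs.length := by omega
    subst this
    rw [pvLG, dif_neg (by omega)]
  | succ n ih
  =>
    intro i hn h6 hlen
    by_cases hi : i < cs.length
    · rw [pvLG, dif_pos hi]
      have hih := ih (i + 1) (by omega) (by omega) (by omega)
      have hsub : i + 1 - 1 = i := by omega
      rw [hsub] at hih
      cases hLG : pvLG cs (i + 1) with
      | some k => rw [hLG] at hih; simpa using hih
      | none =>
        rw [hLG] at hih
        simp only at hih ⊢
        rw [hih]
        by_cases hg : pvGood cs i = true
        · have h' := hg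
          unfold pvGood at h'
          rw [Bool.and_eq_true, Bool.and_eq_true] at h'
          obtain ⟨⟨-, hq2⟩, he2⟩ := h'
          rw [if_pos hg]
          rw [aFind, dif_pos h6, if_pos (beq_iff_eq.mp hq2), if_pos (beq_iff_eq.mp he2)]
        · rw [if_neg hg]
          rw [aFind, dif_pos h6]
          by_cases hq : cs.getD i ' ' = '"'
          · rw [if_pos hq]
            have : ¬ aCount cs (i - 1) % 2 = 0 := by
              intro he; exact hg (by unfold pvGood; rw [hq]; simp [h6]; omega)
            rw [if_neg this]
          · rw [if_neg hq]
    · have : i = cs.length := by omega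
      subst this
      rw [pvLG, dif_neg (by omega)]

lemma scan_agree (cs : List Char) (h6 : 6 ≤ cs.length) :
    aFind cs (cs.length - 1) = bScan cs 6 false none := by
  have hc5 : aCount cs 5 = 0 := by rw [aCount]; rw [dif_neg (by omega)]
  have hb := bScan_eq_LG cs cs.length 6 none (by omega) (by omega)
  have : (decide (aCount cs (6 - 1) % 2 = 1)) = false := by simp [hc5]
  rw [this] at hb
  have ha := aFind_eq_LG cs cs.length 6 (by omega) (by omega) h6
  have h5 : aFind cs (6 - 1) = none := by rw [aFind]; rw [dif_neg (by omega)]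
  rw [h5] at ha
  rw [ha, hb]

lemma startswith_len (cs : List Char) (h : PySem.Chars.startswith cs pvPrefix = true) :
    6 ≤ cs.length := by
  have := (PySem.Chars.startswith_iff cs pvPrefix).mp h
  have hl := this.length_le
  simpa [pvPrefix] using hl

-- ===== VERDICT (by name: the statement is the Claim_ definition above) =====
theorem split_type_line_spec : Claim_equal_split_type_line := by
  intro line _
  unfold Spec_split_type_line split_type_line split_type_line_alt
  by_cases h : PySem.Chars.startswith line.toList pvPrefix
  · rw [if_pos h, if_pos h, scan_agree line.toList (startswith_len line.toList h)]
  · simp [h]
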